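-- pv_equiv track=rewrite | github.com/johnabaldwin/poly_regression | tb/cocotb/tb_config.py | sim_cycle_budget
-- ===== SOURCE A (Python) =====
-- def sim_cycle_budget(degree: int, num_samples: int, max_iterations: int,
--                      fma_latency: int = 2) -> int:
--     """Estimate the simulation cycle budget for a poly_regression run.
--
--     fp_power latency scales as 3+(d-1)*(fma_latency+3) per sample, and the
--     reverse pass loops over every coefficient k=0..degree, so total cycles grow
--     roughly as degree² × num_samples × max_iterations.  Returns 2× the
--     estimated cycle count as a safety margin.
--     """
--     def pow_lat(d: int) -> int:
--         return 2 if d == 0 else 3 + (d - 1) * (fma_latency + 3)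
--
--     fwd = (num_samples + 1) * (1 + pow_lat(degree)) + 1
--     rev = sum(2 + (num_samples - 1) * (1 + pow_lat(k)) for k in range(degree + 1))
--     per_iter = fwd + rev + 2
--     return 2 * (max_iterations + 2) * per_iter
-- ===== SOURCE B (Python) =====
-- def sim_cycle_budget(degree: int, num_samples: int, max_iterations: int,
--                      fma_latency: int = 2) -> int:
--     """Closed-form version: the reverse-pass sum over k=0..degree is an
--     arithmetic series, evaluated directly in O(1)."""
--     m = num_samples - 1
--     if degree == 0:
--         pl_deg = 2
--     else:
--         pl_deg = 3 + (degree - 1) * (fma_latency + 3)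
--     fwd = (num_samples + 1) * (1 + pl_deg) + 1
--     if degree < 0:
--         rev = 0
--     else:
--         # k=0 term: 2 + 3*m ; k=1..degree: 2 + m*(4 + (k-1)*(fma_latency+3))
--         rev = (2 + 3 * m) + degree * (2 + 4 * m) \
--               + m * (fma_latency + 3) * (degree * (degree - 1) // 2)
--     per_iter = fwd + rev + 2
--     return 2 * (max_iterations + 2) * per_iter
-- ===== Notes on version B (the rewrite author's own statement) =====
-- stated objective: faster
-- what changed: Replaced A's O(degree) generator-sum over k=0..degree by the closed-form arithmetic-series formula (plus an empty-range branch for degree<0), evaluated in O(1).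
import Mathlib
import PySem

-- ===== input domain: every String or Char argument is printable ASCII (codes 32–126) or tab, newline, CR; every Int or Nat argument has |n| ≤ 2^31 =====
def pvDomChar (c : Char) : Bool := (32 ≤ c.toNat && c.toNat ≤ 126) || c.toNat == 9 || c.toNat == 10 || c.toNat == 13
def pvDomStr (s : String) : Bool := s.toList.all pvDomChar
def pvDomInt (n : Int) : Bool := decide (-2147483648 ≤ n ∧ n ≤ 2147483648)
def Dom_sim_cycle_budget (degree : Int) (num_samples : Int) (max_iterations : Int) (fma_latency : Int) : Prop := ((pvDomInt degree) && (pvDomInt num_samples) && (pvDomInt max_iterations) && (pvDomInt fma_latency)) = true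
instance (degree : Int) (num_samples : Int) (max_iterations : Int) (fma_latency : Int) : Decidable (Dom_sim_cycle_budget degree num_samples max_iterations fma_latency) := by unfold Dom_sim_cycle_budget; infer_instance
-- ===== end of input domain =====

-- B replaces A's O(degree) reverse-pass summation loop by the closed-form
-- arithmetic-series formula (objective: faster, asymptotic O(1) vs O(degree)).

-- ===== PORT A =====
-- inner helper pow_lat (closes over fma_latency)
def pvPowLat (fma_latency : Int) (d : Int) : Int :=
  if d = 0 then 2 else 3 + (d - 1) * (fma_latency + 3)

def sim_cycle_budget (degree : Int) (num_samples : Int) (max_iterations : Int) (fma_latency : Int) : Int :=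
  let fwd := (num_samples + 1) * (1 + pvPowLat fma_latency degree) + 1
  let rev := ((PySem.List.pyRange 0 (degree + 1) 1).map
      (fun k => 2 + (num_samples - 1) * (1 + pvPowLat fma_latency k))).sum
  let per_iter := fwd + rev + 2
  2 * (max_iterations + 2) * per_iter

-- ===== PORT B =====
def sim_cycle_budget_alt (degree : Int) (num_samples : Int) (max_iterations : Int) (fma_latency : Int) : Int :=
  let m := num_samples - 1
  let pl_deg := if degree = 0 then 2 else 3 + (degree - 1) * (fma_latency + 3)
  let fwd := (num_samples + 1) * (1 + pl_deg) + 1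
  let rev := if degree < 0 then 0 else
    (2 + 3 * m) + degree * (2 + 4 * m)
      + m * (fma_latency + 3) * PySem.Int.floordiv (degree * (degree - 1)) 2
  let per_iter := fwd + rev + 2
  2 * (max_iterations + 2) * per_iter

-- ===== PRECONDITION & SPEC =====
def Spec_sim_cycle_budget (degree : Int) (num_samples : Int) (max_iterations : Int) (fma_latency : Int) (out : Int) : Prop := out = sim_cycle_budget_alt degree num_samples max_iterations fma_latency
instance (degree : Int) (num_samples : Int) (max_iterations : Int) (fma_latency : Int) (out : Int) : Decidable (Spec_sim_cycle_budget degree num_samples max_iterations fma_latency out) := by unfold Spec_sim_cycle_budget; infer_instance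

-- ===== CLAIM (what is proved, stated in full; the proofs are below) =====
def Claim_equal_sim_cycle_budget : Prop := ∀ (degree : Int) (num_samples : Int) (max_iterations : Int) (fma_latency : Int), Dom_sim_cycle_budget degree num_samples max_iterations fma_latency → Spec_sim_cycle_budget degree num_samples max_iterations fma_latency (sim_cycle_budget degree num_samples max_iterations fma_latency)

-- ===== LEMMAS AND PROOFS =====

-- twice A's reverse-pass sum, in closed polynomial form (no division)
lemma pv_rev_two (m f : Int) : ∀ d : Nat,
    2 * (((PySem.List.pyRange 0 ((d : Int) + 1) 1).map
        (fun k => 2 + m * (1 + pvPowLat f k))).sum)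
    = 2 * ((2 + 3 * m) + (d : Int) * (2 + 4 * m))
      + m * (f + 3) * ((d : Int) * ((d : Int) - 1)) := by
  intro d
  induction d with
  | zero =>
      have h01 : PySem.List.pyRange 0 1 1 = [0] := by decide
      simp [h01, pvPowLat]
      ring
  | succ n ih =>
      have hsplit : PySem.List.pyRange 0 ((n : Int) + 1 + 1) 1
          = PySem.List.pyRange 0 ((n : Int) + 1) 1 ++ [(n : Int) + 1] := by
        exact PySem.List.pyRange_one_succ_right (by omega)
      push_cast
      rw [hsplit]
      have hne : ¬((n : Int) + 1 = 0) := by omega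
      simp only [List.map_append, List.sum_append, List.map_cons, List.map_nil,
        List.sum_cons, List.sum_nil]
      have hpl : pvPowLat f ((n : Int) + 1) = 3 + ((n : Int) + 1 - 1) * (f + 3) := by
        simp [pvPowLat, hne]
      rw [hpl]
      push_cast at ih ⊢
      linear_combination ih

lemma pv_rev_eq (m f : Int) (degree : Int) (hd : 0 ≤ degree) :
    ((PySem.List.pyRange 0 (degree + 1) 1).map
        (fun k => 2 + m * (1 + pvPowLat f k))).sum
    = (2 + 3 * m) + degree * (2 + 4 * m)
      + m * (f + 3) * PySem.Int.floordiv (degree * (degree - 1)) 2 := by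
  obtain ⟨d, rfl⟩ := Int.eq_ofNat_of_zero_le hd
  have h2 := pv_rev_two m f d
  have hdvd : (2 : Int) ∣ (d : Int) * ((d : Int) - 1) := by
    rcases Int.even_or_odd (d : Int) with ⟨k, hk⟩ | ⟨k, hk⟩
    · exact ⟨k * ((d : Int) - 1), by rw [hk]; ring⟩
    · exact ⟨(d : Int) * k, by rw [hk]; ring⟩
  obtain ⟨q, hq⟩ := hdvd
  have hfd : PySem.Int.floordiv ((d : Int) * ((d : Int) - 1)) 2 = q := by
    rw [PySem.Int.floordiv_eq_ediv_of_pos (by norm_num), hq]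
    omega
  rw [hfd]
  have h : 2 * (((PySem.List.pyRange 0 ((d : Int) + 1) 1).map
        (fun k => 2 + m * (1 + pvPowLat f k))).sum)
      = 2 * ((2 + 3 * m) + (d : Int) * (2 + 4 * m) + m * (f + 3) * q) := by
    linear_combination h2 + m * (f + 3) * hq
  linarith [h]

-- ===== VERDICT (by name: the statement is the Claim_ definition above) =====
theorem sim_cycle_budget_spec : Claim_equal_sim_cycle_budget := by
  intro degree num_samples max_iterations fma_latency _
  unfold Spec_sim_cycle_budget sim_cycle_budget sim_cycle_budget_alt
  by_cases hd : degree < 0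
  · have hnil : PySem.List.pyRange 0 (degree + 1) 1 = [] :=
      PySem.List.pyRange_one_eq_nil (by omega)
    simp [hnil, if_pos hd, pvPowLat]
  · rw [not_lt] at hd
    have hrev := pv_rev_eq (num_samples - 1) fma_latency degree hd
    rw [hrev]
    simp only [pvPowLat, if_neg (not_lt.mpr hd)]
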